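-- pv_equiv track=rewrite | github.com/amityi90/poligarden-api | db/seed.py | make_bidirectional
-- ===== SOURCE A (Python) =====
-- def make_bidirectional(raw_pairs):
--     """Given one-directional pairs, return all unique bidirectional pairs."""
--     seen = set()
--     result = []
--     for a, b in raw_pairs:
--         if a == b:
--             continue
--         for pair in [(a, b), (b, a)]:
--             if pair not in seen:
--                 seen.add(pair)
--                 result.append(pair)
--     return result
-- ===== SOURCE B (Python) =====
-- def make_bidirectional(raw_pairs):
--     """Given one-directional pairs, return all unique bidirectional pairs."""
--     # Deduplicate by the canonical UNDIRECTED edge (min, max), remembering the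
--     # first-seen orientation; then emit both orientations per edge at the end.
--     edges = {}
--     for a, b in raw_pairs:
--         if a != b:
--             edges.setdefault((min(a, b), max(a, b)), (a, b))
--     result = []
--     for a, b in edges.values():
--         result.append((a, b))
--         result.append((b, a))
--     return result
-- ===== Notes on version B (the rewrite author's own statement) =====
-- stated objective: alternative
-- what changed: B keys deduplication on the canonical UNDIRECTED edge (min,max) via dict.setdefault, halving the dedup structure and storing one entry per edge with its first-seen orientation, then a separate final pass emits both orientations per edge; A instead tracks every directed orientation in a seen-set and interleaves emission with the scan. Correct because A always adds both orientations of an edge together, adjacent and in first-seen orientation order.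
import Mathlib
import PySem

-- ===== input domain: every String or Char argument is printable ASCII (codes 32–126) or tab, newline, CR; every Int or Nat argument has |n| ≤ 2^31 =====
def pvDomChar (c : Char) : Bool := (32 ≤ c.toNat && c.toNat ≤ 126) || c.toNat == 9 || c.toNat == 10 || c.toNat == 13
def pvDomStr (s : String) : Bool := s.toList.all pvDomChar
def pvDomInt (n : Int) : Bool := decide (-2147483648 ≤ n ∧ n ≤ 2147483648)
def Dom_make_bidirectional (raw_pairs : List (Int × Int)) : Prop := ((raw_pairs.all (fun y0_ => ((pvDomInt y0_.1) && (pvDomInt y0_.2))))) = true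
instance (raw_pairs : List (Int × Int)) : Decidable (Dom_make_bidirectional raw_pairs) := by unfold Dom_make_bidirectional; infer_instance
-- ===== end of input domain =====

-- B replaces A's directed seen-set with a dict keyed by the canonical undirected edge (min,max)
-- built via setdefault, emitting both orientations per stored edge in a separate final pass;
-- alternative decomposition, same O(n) cost.


-- ===== PORT A =====
-- inner 'for pair in [(a, b), (b, a)]: if pair not in seen: seen.add(pair); result.append(pair)'
def mbInner (st : PySem.Set (Int × Int) × List (Int × Int)) (pair : Int × Int) :
    PySem.Set (Int × Int) × List (Int × Int) :=
  if PySem.Set.contains st.1 pair then st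
  else (PySem.Set.add st.1 pair, st.2 ++ [pair])

-- one iteration of the outer 'for a, b in raw_pairs' loop
def mbStep (st : PySem.Set (Int × Int) × List (Int × Int)) (p : Int × Int) :
    PySem.Set (Int × Int) × List (Int × Int) :=
  if p.1 == p.2 then st
  else [(p.1, p.2), (p.2, p.1)].foldl mbInner st

def make_bidirectional (raw_pairs : List (Int × Int)) : List (Int × Int) :=
  (raw_pairs.foldl mbStep (PySem.Set.empty, [])).2

-- ===== PORT B =====
-- loop 1: edges.setdefault((min(a,b), max(a,b)), (a, b)) for each non-degenerate pair
def mbEdges (raw_pairs : List (Int × Int)) : PySem.Dict (Int × Int) (Int × Int) :=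
  raw_pairs.foldl
    (fun d p =>
      if p.1 == p.2 then d
      else PySem.Dict.setdefault d (min p.1 p.2, max p.1 p.2) (p.1, p.2))
    PySem.Dict.empty

-- loop 2: 'for a, b in edges.values(): result.append((a, b)); result.append((b, a))'
def make_bidirectional_alt (raw_pairs : List (Int × Int)) : List (Int × Int) :=
  (PySem.Dict.values (mbEdges raw_pairs)).foldl
    (fun result ab => result ++ [(ab.1, ab.2), (ab.2, ab.1)]) []

-- ===== PRECONDITION & SPEC =====
def Spec_make_bidirectional (raw_pairs : List (Int × Int)) (out : List (Int × Int)) : Prop := out = make_bidirectional_alt raw_pairs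
instance (raw_pairs : List (Int × Int)) (out : List (Int × Int)) : Decidable (Spec_make_bidirectional raw_pairs out) := by unfold Spec_make_bidirectional; infer_instance

-- ===== CLAIM (what is proved, stated in full; the proofs are below) =====
def Claim_equal_make_bidirectional : Prop := ∀ (raw_pairs : List (Int × Int)), Dom_make_bidirectional raw_pairs → Spec_make_bidirectional raw_pairs (make_bidirectional raw_pairs)

-- ===== LEMMAS AND PROOFS =====

-- the per-pair directed candidates of A, as a flatMap body
def mbCand1 (p : Int × Int) : List (Int × Int) :=
  if p.1 == p.2 then [] else [(p.1, p.2), (p.2, p.1)]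

-- B's outer step on the dict
def mbBStep (d : PySem.Dict (Int × Int) (Int × Int)) (p : Int × Int) :
    PySem.Dict (Int × Int) (Int × Int) :=
  if p.1 == p.2 then d
  else PySem.Dict.setdefault d (min p.1 p.2, max p.1 p.2) (p.1, p.2)

-- both orientations of every stored edge, in item order
def mbEmit (its : List ((Int × Int) × (Int × Int))) : List (Int × Int) :=
  its.flatMap (fun kv => [(kv.2.1, kv.2.2), (kv.2.2, kv.2.1)])

-- invariant of B's dict: each key is the canonical form of its (non-degenerate) value
def mbInv (d : PySem.Dict (Int × Int) (Int × Int)) : Prop :=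
  ∀ kv ∈ d.items, kv.1 = (min kv.2.1 kv.2.2, max kv.2.1 kv.2.2) ∧ kv.2.1 ≠ kv.2.2

-- A's per-candidate step, started on a diagonal state, stays diagonal and is Set.add
lemma mbInner_diag (s : List (Int × Int)) (pair : Int × Int) :
    mbInner (s, s) pair = (PySem.Set.add s pair, PySem.Set.add s pair) := by
  unfold mbInner PySem.Set.add
  split <;> simp_all

lemma foldl_mbInner_diag (xs : List (Int × Int)) (s : List (Int × Int)) :
    xs.foldl mbInner (s, s) = (xs.foldl PySem.Set.add s, xs.foldl PySem.Set.add s) := by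
  induction xs generalizing s with
  | nil => rfl
  | cons x xs ih => simp [List.foldl_cons, mbInner_diag, ih]

lemma mbStep_diag (s : List (Int × Int)) (p : Int × Int) :
    mbStep (s, s) p = ((mbCand1 p).foldl PySem.Set.add s, (mbCand1 p).foldl PySem.Set.add s) := by
  unfold mbStep mbCand1
  split
  · rfl
  · rw [foldl_mbInner_diag]

lemma foldl_mbStep_diag (raw : List (Int × Int)) (s : List (Int × Int)) :
    raw.foldl mbStep (s, s) =
      ((raw.flatMap mbCand1).foldl PySem.Set.add s,
       (raw.flatMap mbCand1).foldl PySem.Set.add s) := by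
  induction raw generalizing s with
  | nil => rfl
  | cons p raw ih =>
    simp only [List.foldl_cons, List.flatMap_cons, List.foldl_append, mbStep_diag]
    exact ih _

-- membership in the emitted list ↔ the canonical key is stored (under the invariant)
lemma mem_mbEmit_iff (d : PySem.Dict (Int × Int) (Int × Int)) (h : mbInv d) (x : Int × Int)
    (hx : x.1 ≠ x.2) :
    x ∈ mbEmit d.items ↔ (min x.1 x.2, max x.1 x.2) ∈ d.items.map (·.1) := by
  unfold mbEmit
  simp only [List.mem_flatMap, List.mem_map]
  constructor
  · rintro ⟨kv, hkv, hmem⟩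
    obtain ⟨hk, -⟩ := h kv hkv
    refine ⟨kv, hkv, ?_⟩
    simp only [List.mem_cons] at hmem
    rcases hmem with h1 | h1 | h1
    · rw [hk]; cases x; cases h1; simp
    · rw [hk]; cases x; cases h1; simp [min_comm, max_comm]
    · exact absurd h1 (by simp)
  · rintro ⟨kv, hkv, hk⟩
    obtain ⟨hk', hne⟩ := h kv hkv
    refine ⟨kv, hkv, ?_⟩
    rw [hk'] at hk
    obtain ⟨x1, x2⟩ := x
    obtain ⟨k, v1, v2⟩ := kv
    simp only [Prod.ext_iff] at hk
    simp only [List.mem_cons, List.not_mem_nil, or_false, Prod.ext_iff]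
    simp only [min_def, max_def] at hk
    split_ifs at hk <;> omega

-- MAIN: A's remaining candidate fold, started from B's emitted-so-far list,
-- equals the emission of B's final dict
lemma mb_main (raw : List (Int × Int)) (d : PySem.Dict (Int × Int) (Int × Int))
    (h : mbInv d) :
    (raw.flatMap mbCand1).foldl PySem.Set.add (mbEmit d.items) =
      mbEmit (raw.foldl mbBStep d).items := by
  induction raw generalizing d with
  | nil => rfl
  | cons p raw ih =>
    simp only [List.flatMap_cons, List.foldl_append, List.foldl_cons]
    unfold mbCand1 mbBStep
    by_cases hpp : p.1 = p.2
    · simp only [hpp, beq_self_eq_true, if_true, List.foldl_nil]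
      exact ih d h
    · have hbeq : (p.1 == p.2) = false := by simp [hpp]
      simp only [hbeq, Bool.false_eq_true, if_false, List.foldl_cons, List.foldl_nil]
      by_cases hc : PySem.Dict.contains d (min p.1 p.2, max p.1 p.2) = true
      · -- key present: both orientations already emitted, setdefault is a no-op
        have hkmem : (min p.1 p.2, max p.1 p.2) ∈ d.items.map (·.1) := by
          have := (PySem.Dict.contains_iff_mem_keys (d := d)
            (k := (min p.1 p.2, max p.1 p.2))).mp hc
          simpa [PySem.Dict.keys] using this
        have hm1 : (p.1, p.2) ∈ mbEmit d.items :=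
          (mem_mbEmit_iff d h (p.1, p.2) hpp).mpr (by simpa using hkmem)
        have hm2 : (p.2, p.1) ∈ mbEmit d.items :=
          (mem_mbEmit_iff d h (p.2, p.1) (Ne.symm hpp)).mpr
            (by simpa [min_comm, max_comm] using hkmem)
        have ha1 : PySem.Set.add (mbEmit d.items) (p.1, p.2) = mbEmit d.items := by
          simp [PySem.Set.add, hm1]
        have ha2 : PySem.Set.add (mbEmit d.items) (p.2, p.1) = mbEmit d.items := by
          simp [PySem.Set.add, hm2]
        rw [ha1, ha2, PySem.Dict.setdefault, if_pos hc]
        exact ih d h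
      · -- key absent: A appends both orientations, B appends one dict entry
        have hknmem : (min p.1 p.2, max p.1 p.2) ∉ d.items.map (·.1) := by
          intro hmem
          exact hc ((PySem.Dict.contains_iff_mem_keys (d := d)
            (k := (min p.1 p.2, max p.1 p.2))).mpr (by simpa [PySem.Dict.keys] using hmem))
        have hm1 : (p.1, p.2) ∉ mbEmit d.items := fun hm =>
          hknmem ((mem_mbEmit_iff d h (p.1, p.2) hpp).mp hm)
        have hm2 : (p.2, p.1) ∉ mbEmit d.items := fun hm =>
          hknmem (by simpa [min_comm, max_comm] using
            (mem_mbEmit_iff d h (p.2, p.1) (Ne.symm hpp)).mp hm)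
        have ha1 : PySem.Set.add (mbEmit d.items) (p.1, p.2) = mbEmit d.items ++ [(p.1, p.2)] := by
          simp only [PySem.Set.add]
          rw [if_neg (by simp [hm1])]
        have ha2 : PySem.Set.add (mbEmit d.items ++ [(p.1, p.2)]) (p.2, p.1) =
            mbEmit d.items ++ [(p.1, p.2), (p.2, p.1)] := by
          simp only [PySem.Set.add]
          rw [if_neg (by simp [hm2, Prod.ext_iff]; omega)]
          simp
        rw [ha1, ha2, PySem.Dict.setdefault, if_neg hc]
        have hemit : mbEmit d.items ++ [(p.1, p.2), (p.2, p.1)] =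
            mbEmit (d.items ++ [((min p.1 p.2, max p.1 p.2), (p.1, p.2))]) := by
          simp [mbEmit]
        rw [hemit]
        have hInv' : mbInv (PySem.Dict.mk (d.items ++ [((min p.1 p.2, max p.1 p.2), (p.1, p.2))])) := by
          intro kv hkv
          simp only [List.mem_append, List.mem_singleton] at hkv
          rcases hkv with hkv | hkv
          · exact h kv hkv
          · subst hkv; exact ⟨rfl, hpp⟩
        exact ih _ hInv'

-- B's output fold is the emission of its dict's items
lemma alt_eq_emit (raw : List (Int × Int)) :
    make_bidirectional_alt raw = mbEmit (mbEdges raw).items := by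
  unfold make_bidirectional_alt mbEmit
  have h : (fun (result : List (Int × Int)) (ab : Int × Int) =>
      result ++ [(ab.1, ab.2), (ab.2, ab.1)]) =
      fun result ab => result ++ (fun ab : Int × Int => [(ab.1, ab.2), (ab.2, ab.1)]) ab := rfl
  rw [h, PySem.List.foldl_append_eq_flatMap]
  simp [PySem.Dict.values, List.flatMap_map]

-- ===== VERDICT (by name: the statement is the Claim_ definition above) =====
theorem make_bidirectional_spec : Claim_equal_make_bidirectional := by
  intro raw _
  unfold Spec_make_bidirectional make_bidirectional
  show (List.foldl mbStep (([] : List (Int × Int)), ([] : List (Int × Int))) raw).2 =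
    make_bidirectional_alt raw
  rw [foldl_mbStep_diag]
  have hB : mbEdges raw = raw.foldl mbBStep PySem.Dict.empty := rfl
  rw [alt_eq_emit, hB]
  have h0 : mbInv PySem.Dict.empty := by intro kv hkv; simp [PySem.Dict.empty] at hkv
  have hm := mb_main raw PySem.Dict.empty h0
  simpa [mbEmit, PySem.Dict.empty] using hm
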